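-- pv_equiv track=rewrite | github.com/WaterGenie35/python-exercises | src/project_euler/1-50/problem_42.py | num_triangle_words
-- ===== SOURCE A (Python) =====
-- from collections.abc import Iterable
-- from typing import List
--
-- def num_triangle_words(words: List[str]) -> int:
--     num_words = 0
--     triangulars = set()
--     triangular_generator = generate_triangular_numbers()
--     largest_triangular = 0
--     for word in words:
--         value = word_value(word)
--         while largest_triangular < value:
--             triangular_number = next(triangular_generator)
--             triangulars.add(triangular_number)
--             largest_triangular = triangular_number
--         if value in triangulars:
--             num_words += 1
--     return num_words
--
-- def word_value(word: str) -> int: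
--     return sum(ord(char) - 96 for char in word)
--
-- def generate_triangular_numbers() -> Iterable[int]:
--     triangular_number = 0
--     head = 0
--     while True:
--         head += 1
--         triangular_number += head
--         yield triangular_number
-- ===== SOURCE B (Python) =====
-- def word_value(word: str) -> int:
--     return sum(ord(char) - 96 for char in word)
--
-- def num_triangle_words(words):
--     count = 0
--     for word in words:
--         v = word_value(word)
--         if any(k * (k + 1) == 2 * v for k in range(1, v + 1)):
--             count += 1
--     return count
-- ===== Notes on version B (the rewrite author's own statement) =====
-- stated objective: alternative
-- what changed: B drops A's shared triangular-number generator and growing set entirely and instead tests each word's value directly with a self-contained predicate (exists k in [1,v] with k*(k+1) = 2v), i.e. triangularity is decided per word with no state carried across words.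
import Mathlib
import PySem

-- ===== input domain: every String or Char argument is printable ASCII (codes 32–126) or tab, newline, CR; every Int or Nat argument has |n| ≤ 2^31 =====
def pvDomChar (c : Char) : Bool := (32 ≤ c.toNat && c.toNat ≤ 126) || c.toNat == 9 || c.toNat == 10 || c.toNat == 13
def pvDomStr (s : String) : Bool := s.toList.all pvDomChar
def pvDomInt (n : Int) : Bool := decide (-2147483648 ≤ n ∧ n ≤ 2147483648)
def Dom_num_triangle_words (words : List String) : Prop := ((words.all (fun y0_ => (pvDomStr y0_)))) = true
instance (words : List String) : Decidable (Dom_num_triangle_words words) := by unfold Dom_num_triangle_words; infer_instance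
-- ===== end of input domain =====

-- B replaces A's shared triangular-number generator + growing set with a per-word
-- self-contained triangularity predicate (∃ k ∈ [1,v], k*(k+1) = 2v); objective: alternative.

-- ===== PORT A =====
-- word_value(word) = sum(ord(char) - 96 for char in word)
def pvWordValue (word : String) : Int :=
  (word.toList.map (fun c => (c.toNat : Int) - 96)).sum

-- the inner 'while largest_triangular < value' loop advancing the generator.
-- In A, largest_triangular is re-assigned the generator's triangular_number on every
-- iteration and both start at 0, so they are one variable here ('tri'); the generator's
-- 'head' counter starts at 0 and only increments, so it is carried as a Nat (same values).
def pvAdvance (value : Int) (head : Nat) (tri : Int) (s : PySem.Set Int) :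
    Nat × Int × PySem.Set Int :=
  if _h : tri < value then
    pvAdvance value (head + 1) (tri + (head + 1)) (PySem.Set.add s (tri + (head + 1)))
  else (head, tri, s)
termination_by (value - tri).toNat
decreasing_by omega

def num_triangle_words (words : List String) : Int :=
  (words.foldl
    (fun (st : Int × Nat × Int × PySem.Set Int) word =>
      let v := pvWordValue word
      let a := pvAdvance v st.2.1 st.2.2.1 st.2.2.2
      (st.1 + (if PySem.Set.contains a.2.2 v then 1 else 0), a))
    (0, 0, 0, PySem.Set.empty)).1

-- ===== PORT B =====
def pvWordValueAlt (word : String) : Int :=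
  (word.toList.map (fun c => (c.toNat : Int) - 96)).sum

def num_triangle_words_alt (words : List String) : Int :=
  words.foldl
    (fun count word =>
      let v := pvWordValueAlt word
      if (PySem.List.pyRange 1 (v + 1) 1).any (fun k => k * (k + 1) == 2 * v)
      then count + 1 else count) 0

-- ===== PRECONDITION & SPEC =====
def Spec_num_triangle_words (words : List String) (out : Int) : Prop := out = num_triangle_words_alt words
instance (words : List String) (out : Int) : Decidable (Spec_num_triangle_words words out) := by unfold Spec_num_triangle_words; infer_instance

-- ===== CLAIM (what is proved, stated in full; the proofs are below) =====
def Claim_equal_num_triangle_words : Prop := ∀ (words : List String), Dom_num_triangle_words words → Spec_num_triangle_words words (num_triangle_words words)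

-- ===== LEMMAS AND PROOFS =====

-- the k-th triangular number, mirroring the generator: T 0 = 0, T (k+1) = T k + (k+1)
def pvT : Nat → Int
  | 0 => 0
  | k + 1 => pvT k + (k + 1)

theorem pvT_ge (k : Nat) : (k : Int) ≤ pvT k := by
  induction k with
  | zero => simp [pvT]
  | succ k ih => simp only [pvT]; omega

theorem pvT_strictMono : StrictMono pvT := by
  apply strictMono_nat_of_lt_succ
  intro k; simp only [pvT]; omega

theorem pvT_two (k : Nat) : 2 * pvT k = (k : Int) * (k + 1) := by
  induction k with
  | zero => simp [pvT]
  | succ k ih => simp only [pvT]; push_cast at ih ⊢; ring_nf at ih ⊢; linarith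

-- invariant of A's fold state: tri is the head-th triangular number and the set holds T 1 .. T head
def pvInv (head : Nat) (tri : Int) (s : PySem.Set Int) : Prop :=
  tri = pvT head ∧ ∀ x : Int, x ∈ s ↔ ∃ i : Nat, 1 ≤ i ∧ i ≤ head ∧ x = pvT i

theorem pvAdvance_spec (value : Int) (head : Nat) (tri : Int) (s : PySem.Set Int)
    (h : pvInv head tri s) :
    pvInv (pvAdvance value head tri s).1 (pvAdvance value head tri s).2.1
      (pvAdvance value head tri s).2.2 ∧ value ≤ (pvAdvance value head tri s).2.1 := by
  induction head, tri, s using pvAdvance.induct value with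
  | case1 head tri s hlt ih =>
      rw [pvAdvance, dif_pos hlt]
      apply ih
      obtain ⟨h1, h2⟩ := h
      refine ⟨by simp only [pvT, h1], fun x => ?_⟩
      rw [PySem.Set.mem_add, h2]
      constructor
      · rintro (⟨i, hi1, hi2, rfl⟩ | rfl)
        · exact ⟨i, hi1, by omega, rfl⟩
        · exact ⟨head + 1, by omega, le_refl _, by simp only [pvT, h1]⟩
      · rintro ⟨i, hi1, hi2, rfl⟩
        rcases Nat.lt_or_ge i (head + 1) with hc | hc
        · exact Or.inl ⟨i, hi1, by omega, rfl⟩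
        · have : i = head + 1 := by omega
          subst this
          right; simp only [pvT, h1]
  | case2 head tri s hlt =>
      rw [pvAdvance, dif_neg hlt]
      exact ⟨h, not_lt.mp hlt⟩

theorem pvMem_iff (head : Nat) (tri : Int) (s : PySem.Set Int) (v : Int)
    (h : pvInv head tri s) (hv : v ≤ tri) :
    (v ∈ s) ↔ ∃ i : Nat, 1 ≤ i ∧ v = pvT i := by
  obtain ⟨h1, h2⟩ := h
  rw [h2]
  constructor
  · rintro ⟨i, hi1, _, rfl⟩; exact ⟨i, hi1, rfl⟩
  · rintro ⟨i, hi1, rfl⟩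
    refine ⟨i, hi1, ?_, rfl⟩
    by_contra hc
    have := pvT_strictMono (show head < i by omega)
    omega

theorem pvAny_iff (v : Int) :
    ((PySem.List.pyRange 1 (v + 1) 1).any (fun k => k * (k + 1) == 2 * v) = true) ↔
      ∃ i : Nat, 1 ≤ i ∧ v = pvT i := by
  rw [List.any_eq_true]
  constructor
  · rintro ⟨k, hk, hkeq⟩
    rw [PySem.List.mem_pyRange_one] at hk
    simp only [beq_iff_eq] at hkeq
    refine ⟨k.toNat, by omega, ?_⟩
    have hk' : (k.toNat : Int) = k := by omega
    have := pvT_two k.toNat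
    rw [hk'] at this
    nlinarith
  · rintro ⟨i, hi1, rfl⟩
    refine ⟨(i : Int), ?_, ?_⟩
    · rw [PySem.List.mem_pyRange_one]
      have := pvT_ge i
      constructor <;> [exact_mod_cast hi1; omega]
    · simp only [beq_iff_eq]
      have := pvT_two i
      linarith

theorem pvFold_eq (words : List String) (n : Int) (head : Nat) (tri : Int)
    (s : PySem.Set Int) (h : pvInv head tri s) :
    (words.foldl
      (fun (st : Int × Nat × Int × PySem.Set Int) word =>
        let v := pvWordValue word
        let a := pvAdvance v st.2.1 st.2.2.1 st.2.2.2
        (st.1 + (if PySem.Set.contains a.2.2 v then 1 else 0), a))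
      (n, head, tri, s)).1 =
    words.foldl
      (fun count word =>
        let v := pvWordValueAlt word
        if (PySem.List.pyRange 1 (v + 1) 1).any (fun k => k * (k + 1) == 2 * v)
        then count + 1 else count) n := by
  induction words generalizing n head tri s with
  | nil => rfl
  | cons w ws ih =>
      simp only [List.foldl_cons]
      set v := pvWordValue w with hvdef
      obtain ⟨hinv, hle⟩ := pvAdvance_spec v head tri s h
      have hmem : (v ∈ (pvAdvance v head tri s).2.2) ↔ ∃ i : Nat, 1 ≤ i ∧ v = pvT i :=
        pvMem_iff _ _ _ v hinv (by rw [hinv.1] at hle ⊢; exact hle)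
      have hcond : PySem.Set.contains (pvAdvance v head tri s).2.2 v =
          (PySem.List.pyRange 1 (v + 1) 1).any (fun k => k * (k + 1) == 2 * v) := by
        rw [Bool.eq_iff_iff]
        exact (PySem.Set.contains_iff (pvAdvance v head tri s).2.2 v).trans
          (hmem.trans (pvAny_iff v).symm)
      rw [hcond, show pvWordValueAlt w = v from rfl]
      have hacc : (if (PySem.List.pyRange 1 (v + 1) 1).any (fun k => k * (k + 1) == 2 * v)
          then n + 1 else n) =
          n + (if (PySem.List.pyRange 1 (v + 1) 1).any (fun k => k * (k + 1) == 2 * v)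
          then 1 else 0) := by split <;> ring
      rw [hacc]
      exact ih (n + if (PySem.List.pyRange 1 (v + 1) 1).any (fun k => k * (k + 1) == 2 * v)
          then 1 else 0)
        (pvAdvance v head tri s).1 (pvAdvance v head tri s).2.1 (pvAdvance v head tri s).2.2 hinv

-- ===== VERDICT (by name: the statement is the Claim_ definition above) =====
theorem num_triangle_words_spec : Claim_equal_num_triangle_words := by
  intro words _
  unfold Spec_num_triangle_words num_triangle_words num_triangle_words_alt
  exact pvFold_eq words 0 0 0 PySem.Set.empty
    ⟨rfl, by intro x; simp [PySem.Set.empty]⟩
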